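-- pv_equiv track=rewrite | github.com/Tmq244/MultiTurnCIR | src/app/reference_tag_service.py | _flatten_tags
-- ===== SOURCE A (Python) =====
-- def _flatten_tags(raw: object) -> list[str]:
--     if not isinstance(raw, list):
--         return []
--
--     result: list[str] = []
--     for group in raw:
--         if not isinstance(group, list):
--             continue
--         for item in group:
--             if not isinstance(item, str):
--                 continue
--             tag = item.strip()
--             if not tag:
--                 continue
--             if tag not in result:
--                 result.append(tag)
--     return result
-- ===== SOURCE B (Python) =====
-- def _flatten_tags(raw: object) -> list[str]:
--     if not isinstance(raw, list):
--         return []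
--     flat = [item.strip()
--             for group in raw if isinstance(group, list)
--             for item in group if isinstance(item, str) and item.strip()]
--     out: list[str] = []
--     while flat:
--         head = flat[0]
--         out.append(head)
--         flat = [y for y in flat[1:] if y != head]
--     return out
-- ===== Notes on version B (the rewrite author's own statement) =====
-- stated objective: alternative
-- what changed: Two staged passes instead of A's interleaved loop: first a flattening comprehension with no dedup logic, then a partition-style dedup that repeatedly emits the current head and filters all of its later copies out of the remaining list, so no membership test against the growing result exists at all.
import Mathlib
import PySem

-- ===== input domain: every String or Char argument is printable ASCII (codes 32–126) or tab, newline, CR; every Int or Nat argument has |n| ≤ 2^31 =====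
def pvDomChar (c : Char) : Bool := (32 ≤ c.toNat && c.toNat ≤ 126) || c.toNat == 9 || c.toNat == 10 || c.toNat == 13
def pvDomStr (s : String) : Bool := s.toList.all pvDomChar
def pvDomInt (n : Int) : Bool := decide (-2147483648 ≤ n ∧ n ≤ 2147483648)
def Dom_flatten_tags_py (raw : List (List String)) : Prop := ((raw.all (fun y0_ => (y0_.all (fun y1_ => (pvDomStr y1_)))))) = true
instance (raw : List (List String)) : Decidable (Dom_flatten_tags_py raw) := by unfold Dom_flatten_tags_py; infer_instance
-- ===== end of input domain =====

-- B replaces A's interleaved membership-test loop by two staged passes (flatten, then a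
-- partition-style dedup that emits the head and filters its later copies out); same cost,
-- return-value equivalence, no mutation involved.
-- ===== PORT A =====
-- Transliteration of A: nested loops, append tag if stripped non-empty and not already in result.
def flatten_tags_py (raw : List (List String)) : List String :=
  raw.foldl (fun result group =>
    group.foldl (fun res item =>
      let tag := PySem.Str.strip item
      if tag = "" then res
      else if tag ∈ res then res
      else res ++ [tag]) result) []

-- ===== PORT B =====
-- B's flattening comprehension (per group), no dedup logic.
def pvFlatOf (g : List String) : List String :=
  (g.map PySem.Str.strip).filter (fun t => t ≠ "")

-- B's while loop: append the head to out, drop all later copies, continue with the rest.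
def pvDedupLoop (out : List String) : List String → List String
  | [] => out
  | x :: xs => pvDedupLoop (out ++ [x]) (xs.filter (fun y => y ≠ x))
termination_by l => l.length
decreasing_by
  have h := List.length_filter_le (fun y : {y // y ∈ xs} => !decide (↑y = x)) xs.attach
  simp only [List.length_attach] at h
  simp
  omega

def flatten_tags_py_alt (raw : List (List String)) : List String :=
  pvDedupLoop [] (raw.flatMap pvFlatOf)

-- ===== PRECONDITION & SPEC =====
def Spec_flatten_tags_py (raw : List (List String)) (out : List String) : Prop := out = flatten_tags_py_alt raw
instance (raw : List (List String)) (out : List String) : Decidable (Spec_flatten_tags_py raw out) := by unfold Spec_flatten_tags_py; infer_instance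

-- ===== CLAIM (what is proved, stated in full; the proofs are below) =====
def Claim_equal_flatten_tags_py : Prop := ∀ (raw : List (List String)), Dom_flatten_tags_py raw → Spec_flatten_tags_py raw (flatten_tags_py raw)

-- ===== LEMMAS AND PROOFS =====
-- A's accumulator step, named.
def pvStep (res : List String) (t : String) : List String :=
  if t ∈ res then res else res ++ [t]

lemma inner_eq (g : List String) (acc : List String) :
    g.foldl (fun res item =>
      let tag := PySem.Str.strip item
      if tag = "" then res
      else if tag ∈ res then res
      else res ++ [tag]) acc = (pvFlatOf g).foldl pvStep acc := by
  induction g generalizing acc with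
  | nil => rfl
  | cons item g ih =>
    simp only [List.foldl, pvFlatOf, List.map, List.filter]
    by_cases h : PySem.Str.strip item = ""
    · simp [h, ih, pvFlatOf]
    · simp [h, ih, pvFlatOf, pvStep]

lemma outer_eq (raw : List (List String)) (acc : List String) :
    raw.foldl (fun result group =>
      group.foldl (fun res item =>
        let tag := PySem.Str.strip item
        if tag = "" then res
        else if tag ∈ res then res
        else res ++ [tag]) result) acc = (raw.flatMap pvFlatOf).foldl pvStep acc := by
  induction raw generalizing acc with
  | nil => rfl
  | cons g raw ih =>
    simp only [List.foldl, List.flatMap_cons, List.foldl_append]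
    rw [inner_eq]; exact ih _

-- A's fold over l from acc equals B's loop run on l with the elements already in acc removed.
lemma foldl_step_eq_dedupLoop (l : List String) (acc : List String) :
    l.foldl pvStep acc = pvDedupLoop acc (l.filter (fun y => y ∉ acc)) := by
  induction l generalizing acc with
  | nil => simp [pvDedupLoop]
  | cons x xs ih =>
    by_cases h : x ∈ acc
    · rw [List.foldl_cons, List.filter_cons_of_neg (by simp [h])]
      simp only [pvStep, if_pos h]
      exact ih acc
    · rw [List.foldl_cons, List.filter_cons_of_pos (by simp [h])]
      simp only [pvStep, if_neg h]
      rw [ih (acc ++ [x])]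
      conv_rhs => rw [pvDedupLoop]
      rw [List.filter_filter]
      congr 1
      apply List.filter_congr
      intro y _
      by_cases hy : y = x <;> simp [hy, h, List.mem_append]

theorem flatten_tags_py_spec : Claim_equal_flatten_tags_py := by
  intro raw _
  show flatten_tags_py raw = flatten_tags_py_alt raw
  rw [flatten_tags_py, flatten_tags_py_alt, outer_eq, foldl_step_eq_dedupLoop]
  simp
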